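-- pv_equiv track=rewrite | github.com/AI-Huang/NLP_Data_Tools | utils/bio_decode.py | get_sent_num_tags
-- ===== SOURCE A (Python) =====
-- class Entity(object):
--     def __init__(self, entity, tag, begin, end):
--         self.entity = entity
--         self.tag = tag
--         self.begin = begin
--         self.end = end
--
--     def to_tuple(self):
--         return tuple([self.entity, self.begin, self.end])
--
--     def __str__(self):
--         return str({key: value for key, value in self.__dict__.items()})
--
--     def __repr__(self):
--         return str({key: value for key, value in self.__dict__.items()})
--
-- def bio_decode(words, tags):
--     """decode BIO inputs to tags
--     Inputs:
--         char_label_list: list of tuple (word, bmes-tag)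
--     Returns:
--         tags
--     Examples:
--         >>> x = [("Hi", "O"), ("Beijing", "B-LOC")]
--         >>> bio_decode(x)
--         [{'entity': 'Beijing', 'tag': 'LOC', 'begin': 1, 'end': 2}]
--     """
--     length = len(words)
--     assert length >= 2
--     assert len(words) == len(tags)
--
--     entities = []
--
--     # State machine transition cases:
--     # O -> O, do nothing; O -> I, impossible,
--     # O -> B, B -> B, I -> B, start labeling entity,
--     # B -> I, I -> I, keep labeling,
--     # B -> O, I -> O, stop labeling, reset entity.
--
--     entity, start_position, end_position = "", None, None
--     previous_word, previous_tag = words[0], tags[0]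
--     previous_label = previous_tag[0]
--
--     idx = 1
--     while idx < length:
--         # Process past labels
--         if previous_label == "B":
--             start_position, end_position = idx, idx + 1
--             entity += previous_word
--         elif previous_label == "I":
--             # Uncomment to throw entities labeled starting with I-XXX
--             # if start_position is None:
--             #     idx += 1
--             #     continue
--             # In case that labels start with I-XXX
--             start_position = idx if start_position is None else start_position
--             end_position = end_position+1 if end_position is not None else idx+1
--             entity += previous_word
--         elif previous_label == "O":
--             pass
--
--         # Process current label
--         current_word, current_tag = words[idx], tags[idx]
--         current_label = current_tag[0]
--
--         # Check whether to stop previous labeling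
--         if current_label == "O" or current_label == "B":
--             if entity != "":
--                 entities.append(
--                     Entity(entity, previous_tag[2:], start_position, end_position))
--                 entity, start_position, end_position = "", None, None
--
--         previous_word, previous_tag = words[idx], tags[idx]
--         previous_label = previous_tag[0]
--         idx += 1
--
--     return entities
--
-- def get_sent_num_tags(words, tags, tag_type):
--     """
--     Inputs:
--         words:
--         tags:
--         tag_type: e.g., "LOC".
--     """
--     num_tags_gt = 0
--     for tag in tags:
--         if tag.startswith('B'):
--             if tag[2:] == tag_type:
--                 num_tags_gt += 1
--
--     num_tags = 0
--     entities = bio_decode(words, tags)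
--     for entity in entities:
--         if entity.tag == tag_type:
--             num_tags += 1
--
--     return num_tags_gt, num_tags
-- ===== SOURCE B (Python) =====
-- def get_sent_num_tags(words, tags, tag_type):
--     """
--     Inputs:
--         words:
--         tags:
--         tag_type: e.g., "LOC".
--     """
--     length = len(words)
--     assert length >= 2
--     assert len(words) == len(tags)
--
--     num_tags_gt = sum(1 for tag in tags
--                       if tag.startswith('B') and tag[2:] == tag_type)
--
--     # Single pass over the tag sequence: an entity is open after a B- or I-
--     # tag and closes at the next O or B tag; count the ones whose closing
--     # tag's type matches tag_type.
--     num_tags = 0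
--     inside = False
--     for idx in range(1, length):
--         if tags[idx - 1][0] in "BI":
--             inside = True
--         if tags[idx][0] in "OB":
--             if inside and tags[idx - 1][2:] == tag_type:
--                 num_tags += 1
--             inside = False
--
--     return num_tags_gt, num_tags
-- ===== Notes on version B (the rewrite author's own statement) =====
-- stated objective: simpler
-- what changed: Replaces bio_decode, the Entity objects and the entities list with a single pass over adjacent tag pairs that tracks one 'inside an entity' boolean computed from the tags alone and counts entity-closing transitions directly.
-- intended difference: On inputs where a decoded entity consists entirely of empty-string words, A's 'entity != ""' guard misfires and A's num_tags omits that entity, while B counts it from the tags alone, which is the intended count of decoded entities of the given type. — e.g. on get_sent_num_tags(["", ""], ["B-LOC", "O"], "LOC"): A returns (1, 0), B returns (1, 1)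
import Mathlib
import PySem

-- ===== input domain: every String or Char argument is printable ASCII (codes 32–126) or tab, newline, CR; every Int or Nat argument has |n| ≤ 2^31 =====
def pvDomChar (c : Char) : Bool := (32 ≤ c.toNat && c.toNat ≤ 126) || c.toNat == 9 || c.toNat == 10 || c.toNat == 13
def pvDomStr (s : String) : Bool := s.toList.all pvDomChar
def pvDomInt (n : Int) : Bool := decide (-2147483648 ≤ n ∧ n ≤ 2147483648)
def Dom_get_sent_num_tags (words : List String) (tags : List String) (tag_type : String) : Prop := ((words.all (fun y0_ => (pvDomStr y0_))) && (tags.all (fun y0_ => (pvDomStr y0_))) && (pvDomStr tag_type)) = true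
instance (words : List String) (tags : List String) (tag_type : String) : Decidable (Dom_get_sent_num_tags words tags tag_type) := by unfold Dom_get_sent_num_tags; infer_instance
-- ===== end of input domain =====

-- B replaces bio_decode and the entities list with one pass over adjacent tag pairs that tracks a single
-- 'inside an entity' boolean computed from the tags alone (objective: simpler; see D_ for the one corner
-- where the two disagree).

-- ===== PORT A =====
-- Entity objects are ported as tuples (entity-text as List Char, tag, begin, end).

-- one iteration of bio_decode's while loop; state = (entity, start_position, end_position, previous_word, previous_tag, entities)
def pvBioStep (words tags : List String)
    (st : List Char × Option Int × Option Int × String × String × List (List Char × String × Option Int × Option Int))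
    (idx : Int) :
    List Char × Option Int × Option Int × String × String × List (List Char × String × Option Int × Option Int) :=
  match st with
  | (entity, sp, ep, prevWord, prevTag, entities) =>
    let prevLabel := (PySem.Str.pyGet? prevTag 0).getD ' '
    let t1 :=
      if prevLabel = 'B' then (entity ++ prevWord.toList, some idx, some (idx + 1))
      else if prevLabel = 'I' then
        (entity ++ prevWord.toList,
         (match sp with | none => some idx | some s => some s),
         (match ep with | some e => some (e + 1) | none => some (idx + 1)))
      else (entity, sp, ep)
    let curWord := PySem.List.pyGetD words idx ""
    let curTag := PySem.List.pyGetD tags idx ""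
    let curLabel := (PySem.Str.pyGet? curTag 0).getD ' '
    if (curLabel = 'O' ∨ curLabel = 'B') ∧ t1.1 ≠ [] then
      ([], none, none, curWord, curTag,
        entities ++ [(t1.1, PySem.Str.slice prevTag (some 2) none, t1.2.1, t1.2.2)])
    else (t1.1, t1.2.1, t1.2.2, curWord, curTag, entities)

def bio_decode (words tags : List String) : List (List Char × String × Option Int × Option Int) :=
  ((PySem.List.pyRange 1 (words.length : Int) 1).foldl (pvBioStep words tags)
    ([], none, none, PySem.List.pyGetD words 0 "", PySem.List.pyGetD tags 0 "", [])).2.2.2.2.2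

def get_sent_num_tags (words : List String) (tags : List String) (tag_type : String) : Int × Int :=
  let num_tags_gt : Int := tags.foldl
    (fun acc tag =>
      if PySem.Str.startswith tag "B" then
        (if PySem.Str.slice tag (some 2) none = tag_type then acc + 1 else acc)
      else acc) 0
  let entities := bio_decode words tags
  let num_tags : Int := entities.foldl
    (fun acc e => if e.2.1 = tag_type then acc + 1 else acc) 0
  (num_tags_gt, num_tags)

-- ===== PORT B =====
-- one iteration of B's for loop; state = (num_tags, inside)
def pvAltStep (tags : List String) (tag_type : String)
    (st : Int × Bool) (idx : Int) : Int × Bool :=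
  let prev := PySem.List.pyGetD tags (idx - 1) ""
  let prevLab := (PySem.Str.pyGet? prev 0).getD ' '
  let inside1 := if prevLab = 'B' ∨ prevLab = 'I' then true else st.2
  let cur := PySem.List.pyGetD tags idx ""
  let curLab := (PySem.Str.pyGet? cur 0).getD ' '
  if curLab = 'O' ∨ curLab = 'B' then
    ((if inside1 = true ∧ PySem.Str.slice prev (some 2) none = tag_type then st.1 + 1 else st.1),
     false)
  else (st.1, inside1)

def get_sent_num_tags_alt (words : List String) (tags : List String) (tag_type : String) : Int × Int :=
  let num_tags_gt : Int :=
    (tags.countP (fun tag => PySem.Str.startswith tag "B" && decide (PySem.Str.slice tag (some 2) none = tag_type)) : Int)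
  let fin := (PySem.List.pyRange 1 (words.length : Int) 1).foldl (pvAltStep tags tag_type) (0, false)
  (num_tags_gt, fin.1)

-- ===== PRECONDITION & SPEC =====
-- spec-side vocabulary for D_: the first character of the k-th tag
def pvL (tags : List String) (k : Nat) : Char := (tags.getD k "").toList.headD ' '
-- Pre_ excludes exactly the inputs where Python A raises: the two asserts (len(words) >= 2,
-- len(words) == len(tags)) and an IndexError from tag[0] on an empty tag string.
def Pre_get_sent_num_tags (words : List String) (tags : List String) (tag_type : String) : Prop :=
  2 ≤ words.length ∧ words.length = tags.length ∧ ∀ t ∈ tags, t ≠ ""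
instance (words : List String) (tags : List String) (tag_type : String) : Decidable (Pre_get_sent_num_tags words tags tag_type) := by unfold Pre_get_sent_num_tags; infer_instance

def pvWitness_get_sent_num_tags : List String × List String × String :=
  (["Hi", "Beijing", "now"], ["O", "B-LOC", "O"], "LOC")

-- On inputs where some decoded entity consists entirely of empty-string words, A's `entity != ""` guard
-- misfires and A omits that entity from num_tags, while B counts the entity from the tags alone, which is
-- the intended count of decoded entities of the given type.
-- k starts an entity run still open at i: a B/I tag with no entity-closing O/B tag after it up to i
abbrev pvRun (tags : List String) (k i : Nat) : Prop :=
  pvL tags k ∈ ['B', 'I'] ∧ ∀ b ≤ i, k < b → pvL tags b ∉ ['O', 'B']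

def D_get_sent_num_tags (words : List String) (tags : List String) (tag_type : String) : Prop :=
  ∃ i < tags.length - 1,
    (tags.getD i "").toList.drop 2 = tag_type.toList ∧
    ∃ k ≤ i, pvRun tags k i ∧ ¬ pvRun tags k (i + 1) ∧
      ∀ j ≤ i, pvRun tags j i → words.getD j "" = ""
instance (words : List String) (tags : List String) (tag_type : String) : Decidable (D_get_sent_num_tags words tags tag_type) := by
  unfold D_get_sent_num_tags
  haveI : ∀ i : Nat, Decidable ((tags.getD i "").toList.drop 2 = tag_type.toList ∧
      ∃ k ≤ i, pvRun tags k i ∧ ¬ pvRun tags k (i + 1) ∧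
        ∀ j ≤ i, pvRun tags j i → words.getD j "" = "") := fun i => by
    haveI : ∀ k : Nat, Decidable (pvRun tags k i ∧ ¬ pvRun tags k (i + 1) ∧
        ∀ j ≤ i, pvRun tags j i → words.getD j "" = "") := fun k => by infer_instance
    infer_instance
  infer_instance

def Spec_get_sent_num_tags (words : List String) (tags : List String) (tag_type : String) (out : Int × Int) : Prop := ¬ D_get_sent_num_tags words tags tag_type → out = get_sent_num_tags_alt words tags tag_type
instance (words : List String) (tags : List String) (tag_type : String) (out : Int × Int) : Decidable (Spec_get_sent_num_tags words tags tag_type out) := by unfold Spec_get_sent_num_tags; infer_instance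

def pvDiffWitness_get_sent_num_tags : List String × List String × String :=
  (["", ""], ["B-LOC", "O"], "LOC")
def pvDiffWitnessOut_get_sent_num_tags : (Int × Int) × (Int × Int) := ((1, 0), (1, 1))

-- ===== CLAIM (what is proved, stated in full; the proofs are below) =====
def Claim_unchanged_get_sent_num_tags : Prop := ∀ (words : List String) (tags : List String) (tag_type : String), Dom_get_sent_num_tags words tags tag_type → Pre_get_sent_num_tags words tags tag_type → Spec_get_sent_num_tags words tags tag_type (get_sent_num_tags words tags tag_type)
def Claim_changed_get_sent_num_tags : Prop := Dom_get_sent_num_tags (pvDiffWitness_get_sent_num_tags.1) (pvDiffWitness_get_sent_num_tags.2.1) (pvDiffWitness_get_sent_num_tags.2.2) ∧ Pre_get_sent_num_tags (pvDiffWitness_get_sent_num_tags.1) (pvDiffWitness_get_sent_num_tags.2.1) (pvDiffWitness_get_sent_num_tags.2.2) ∧ D_get_sent_num_tags (pvDiffWitness_get_sent_num_tags.1) (pvDiffWitness_get_sent_num_tags.2.1) (pvDiffWitness_get_sent_num_tags.2.2) ∧ get_sent_num_tags (pvDiffWitness_get_sent_num_tags.1) (pvDiffWitness_get_sent_num_tags.2.1)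 (pvDiffWitness_get_sent_num_tags.2.2) = pvDiffWitnessOut_get_sent_num_tags.1 ∧ get_sent_num_tags_alt (pvDiffWitness_get_sent_num_tags.1) (pvDiffWitness_get_sent_num_tags.2.1) (pvDiffWitness_get_sent_num_tags.2.2) = pvDiffWitnessOut_get_sent_num_tags.2 ∧ pvDiffWitnessOut_get_sent_num_tags.1 ≠ pvDiffWitnessOut_get_sent_num_tags.2
def Claim_exact_get_sent_num_tags : Prop := ∀ (words : List String) (tags : List String) (tag_type : String), Dom_get_sent_num_tags words tags tag_type → Pre_get_sent_num_tags words tags tag_type → D_get_sent_num_tags words tags tag_type → get_sent_num_tags words tags tag_type ≠ get_sent_num_tags_alt words tags tag_type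

-- ===== LEMMAS AND PROOFS =====

-- proof-side label vocabulary
def pvLab (s : String) : Char := s.toList.headD ' '
def pvBI (s : String) : Bool := pvLab s == 'B' || pvLab s == 'I'
def pvOB (s : String) : Bool := pvLab s == 'O' || pvLab s == 'B'

theorem pvL_BI (tags : List String) (k : Nat) :
    pvL tags k ∈ (['B', 'I'] : List Char) ↔ pvBI (tags.getD k "") = true := by
  simp [pvL, pvBI, pvLab, Bool.or_eq_true, beq_iff_eq]

theorem pvL_OB (tags : List String) (b : Nat) :
    pvL tags b ∈ (['O', 'B'] : List Char) ↔ pvOB (tags.getD b "") = true := by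
  simp [pvL, pvOB, pvLab, Bool.or_eq_true, beq_iff_eq]

theorem pvL_nOB (tags : List String) (b : Nat) :
    pvL tags b ∉ (['O', 'B'] : List Char) ↔ pvOB (tags.getD b "") = false := by
  simp [pvL_OB tags b]

-- tag[2:] as D_ states it is the ports' slice
theorem pvSliceDrop (s t : String) :
    s.toList.drop 2 = t.toList ↔ PySem.Str.slice s (some 2) none = t := by
  constructor <;> intro h
  · apply String.toList_inj.mp
    simp [PySem.Str.slice, PySem.List.slice_from, h]
  · rw [← h]
    simp [PySem.Str.slice, PySem.List.slice_from]

-- a run still open at i is closed at i+1 exactly by an O/B tag there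
theorem pvRun_succ (tags : List String) (k i : Nat) (hk : k ≤ i) (hr : pvRun tags k i) :
    ¬ pvRun tags k (i + 1) ↔ pvOB (tags.getD (i + 1) "") = true := by
  constructor
  · intro hn
    by_contra hob
    refine hn ⟨hr.1, fun b hb hkb => ?_⟩
    rcases Nat.lt_succ_iff_lt_or_eq.mp (Nat.lt_succ_of_le hb) with h | h
    · exact hr.2 b (by omega) hkb
    · subst h
      exact (pvL_nOB tags (i + 1)).mpr (by simpa using hob)
  · intro hob hr'
    have h2 := (pvL_nOB tags (i + 1)).mp (hr'.2 (i + 1) (le_refl _) (by omega))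
    rw [hob] at h2
    exact absurd h2 (by decide)

-- pvLab reads the same character the ports' tag[0] does
theorem pvLab_eq (s : String) : pvLab s = (PySem.Str.pyGet? s 0).getD ' ' := by
  cases hl : s.toList <;> simp [pvLab, hl, PySem.Str.pyGet?_eq, PySem.Chars.pyGet?,
    PySem.List.pyGet?_zero]

-- proof-side state abstractions: an entity is open just after position j-1 was read (tags alone),
-- resp. open with at least one nonempty word picked up
def pvOpenT (tags : List String) : Nat → Bool
  | 0 => false
  | j + 1 => pvBI (tags.getD j "") || (!pvOB (tags.getD j "") && pvOpenT tags j)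
def pvOpenW (words tags : List String) : Nat → Bool
  | 0 => false
  | j + 1 => (pvBI (tags.getD j "") && !(words.getD j "" == "")) || (!pvOB (tags.getD j "") && pvOpenW words tags j)

theorem pvOpenT_iff (tags : List String) :
    ∀ j, (pvOpenT tags j = true ↔
      ∃ k, k < j ∧ pvBI (tags.getD k "") = true ∧
        ∀ b, k < b → b < j → pvOB (tags.getD b "") = false) := by
  intro j
  induction j with
  | zero => simp [pvOpenT]
  | succ i ih =>
    simp only [pvOpenT, Bool.or_eq_true, Bool.and_eq_true, Bool.not_eq_true', ih]
    constructor
    · rintro (hbi | ⟨hob, k, hk, hbiK, hbf⟩)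
      · exact ⟨i, by omega, hbi, by intro b h1 h2; exact absurd h2 (by omega)⟩
      · refine ⟨k, by omega, hbiK, ?_⟩
        intro b hb1 hb2
        rcases Nat.lt_succ_iff_lt_or_eq.mp hb2 with h | h
        · exact hbf b hb1 h
        · subst h; exact hob
    · rintro ⟨k, hk, hbiK, hbf⟩
      rcases Nat.lt_succ_iff_lt_or_eq.mp hk with h | h
      · exact Or.inr ⟨hbf i h (by omega), k, h, hbiK, fun b h1 h2 => hbf b h1 (by omega)⟩
      · subst h; exact Or.inl hbiK

theorem pvOpenW_iff (words tags : List String) :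
    ∀ j, (pvOpenW words tags j = true ↔
      ∃ k, k < j ∧ pvBI (tags.getD k "") = true ∧ words.getD k "" ≠ "" ∧
        ∀ b, k < b → b < j → pvOB (tags.getD b "") = false) := by
  intro j
  induction j with
  | zero => simp [pvOpenW]
  | succ i ih =>
    simp only [pvOpenW, Bool.or_eq_true, Bool.and_eq_true, Bool.not_eq_true', ih,
      beq_eq_false_iff_ne, ne_eq]
    constructor
    · rintro (⟨hbi, hw⟩ | ⟨hob, k, hk, hbiK, hwK, hbf⟩)
      · exact ⟨i, by omega, hbi, hw, by intro b h1 h2; exact absurd h2 (by omega)⟩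
      · refine ⟨k, by omega, hbiK, hwK, ?_⟩
        intro b hb1 hb2
        rcases Nat.lt_succ_iff_lt_or_eq.mp hb2 with h | h
        · exact hbf b hb1 h
        · subst h; exact hob
    · rintro ⟨k, hk, hbiK, hwK, hbf⟩
      rcases Nat.lt_succ_iff_lt_or_eq.mp hk with h | h
      · exact Or.inr ⟨hbf i h (by omega), k, h, hbiK, hwK, fun b h1 h2 => hbf b h1 (by omega)⟩
      · subst h; exact Or.inl ⟨hbiK, hwK⟩

-- the two run conjuncts of D_ are exactly the open-entity states at the commit step
theorem pvD_glue (words tags : List String) (i : Nat) :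
    ((∃ k ≤ i, pvRun tags k i) ↔ pvOpenT tags (i + 1) = true) ∧
    ((∀ k ≤ i, pvRun tags k i → words.getD k "" = "") ↔
      pvOpenW words tags (i + 1) = false) := by
  simp only [pvRun, pvL_BI, pvL_nOB]
  constructor
  · rw [pvOpenT_iff]
    constructor
    · rintro ⟨k, hk, hbi, hbf⟩
      exact ⟨k, by omega, hbi, fun b h1 h2 => hbf b (by omega) h1⟩
    · rintro ⟨k, hk, hbi, hbf⟩
      exact ⟨k, by omega, hbi, fun b h2 h1 => hbf b h1 (by omega)⟩
  · rw [Bool.eq_false_iff, Ne, pvOpenW_iff]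
    constructor
    · rintro h ⟨k, hk, hbi, hw, hbf⟩
      exact hw (h k (by omega) ⟨hbi, fun b h2 h1 => hbf b h1 (by omega)⟩)
    · rintro h k hk ⟨hbi, hbf⟩
      by_contra hw
      exact h ⟨k, by omega, hbi, hw, fun b h1 h2 => hbf b (by omega) h1⟩

-- commit counters for the two loops: pvCntA/pvCntB m = entities of type tt committed at steps idx < m
def pvCntA (words tags : List String) (tt : String) : Nat → Nat
  | 0 => 0
  | m + 1 => pvCntA words tags tt m +
      (if pvOB (tags.getD m "") = true ∧ pvOpenW words tags m = true ∧
          PySem.Str.slice (tags.getD (m - 1) "") (some 2) none = tt then 1 else 0)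

def pvCntB (tags : List String) (tt : String) : Nat → Nat
  | 0 => 0
  | m + 1 => pvCntB tags tt m +
      (if pvOB (tags.getD m "") = true ∧ pvOpenT tags m = true ∧
          PySem.Str.slice (tags.getD (m - 1) "") (some 2) none = tt then 1 else 0)

-- loop invariant of bio_decode's while loop after the steps idx = 1 .. m-1
set_option maxHeartbeats 1000000 in
theorem pvAinv (words tags : List String) (tt : String) :
    ∀ m : Nat, 1 ≤ m →
    (((PySem.List.pyRange 1 (m : Int) 1).foldl (pvBioStep words tags)
        ([], none, none, PySem.List.pyGetD words 0 "", PySem.List.pyGetD tags 0 "", [])).2.2.2.1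
        = words.getD (m - 1) "" ∧
     ((PySem.List.pyRange 1 (m : Int) 1).foldl (pvBioStep words tags)
        ([], none, none, PySem.List.pyGetD words 0 "", PySem.List.pyGetD tags 0 "", [])).2.2.2.2.1
        = tags.getD (m - 1) "" ∧
     (((PySem.List.pyRange 1 (m : Int) 1).foldl (pvBioStep words tags)
        ([], none, none, PySem.List.pyGetD words 0 "", PySem.List.pyGetD tags 0 "", [])).1 ≠ [] ↔
        (pvOB (tags.getD (m - 1) "") = false ∧ pvOpenW words tags (m - 1) = true)) ∧
     ((PySem.List.pyRange 1 (m : Int) 1).foldl (pvBioStep words tags)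
        ([], none, none, PySem.List.pyGetD words 0 "", PySem.List.pyGetD tags 0 "", [])).2.2.2.2.2.countP
        (fun e => decide (e.2.1 = tt)) = pvCntA words tags tt m) := by
  intro m hm
  induction m, hm using Nat.le_induction with
  | base =>
      simp [PySem.List.pyRange_one_eq_nil (by omega : (1:Int) ≤ 1), pvOpenW, pvCntA,
        PySem.List.pyGetD_ofNat']
  | succ n hn ih =>
      obtain ⟨k, rfl⟩ : ∃ k, n = k + 1 := ⟨n - 1, by omega⟩
      rw [show ((k + 1 + 1 : Nat) : Int) = ((k + 1 : Nat) : Int) + 1 by push_cast; ring,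
        PySem.List.pyRange_one_succ_right (by exact_mod_cast hn), List.foldl_append]
      obtain ⟨h1, h2, h3, h4⟩ := ih
      generalize hsa : (PySem.List.pyRange 1 ((k + 1 : Nat) : Int) 1).foldl (pvBioStep words tags)
        ([], none, none, PySem.List.pyGetD words 0 "", PySem.List.pyGetD tags 0 "", []) = sa
        at h1 h2 h3 h4 ⊢
      clear hsa
      obtain ⟨entity, sp, ep, pw, pt, es⟩ := sa
      simp only [Nat.add_sub_cancel] at h1 h2 h3 h4 ⊢
      subst h1 h2
      have hOW : pvOpenW words tags (k + 1) =
          ((pvBI (tags.getD k "") && !(words.getD k "" == "")) ||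
           (!pvOB (tags.getD k "") && pvOpenW words tags k)) := rfl
      have hCA : pvCntA words tags tt (k + 1 + 1) = pvCntA words tags tt (k + 1) +
          (if pvOB (tags.getD (k + 1) "") = true ∧ pvOpenW words tags (k + 1) = true ∧
              PySem.Str.slice (tags.getD (k + 1 - 1) "") (some 2) none = tt then 1 else 0) := rfl
      simp only [List.foldl_cons, List.foldl_nil, pvBioStep, PySem.List.pyGetD_natCast,
        Nat.add_sub_cancel] at hCA ⊢
      by_cases hB : (PySem.Str.pyGet? (tags.getD k "") 0).getD ' ' = 'B' <;>
        by_cases hI : (PySem.Str.pyGet? (tags.getD k "") 0).getD ' ' = 'I'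
      · exact absurd (hB ▸ hI) (by decide)
      all_goals (
        first
        | (have hbi : pvBI (tags.getD k "") = true := by
              simp only [pvBI, pvLab_eq, Bool.or_eq_true, beq_iff_eq]; exact Or.inl hB)
        | (have hbi : pvBI (tags.getD k "") = true := by
              simp only [pvBI, pvLab_eq, Bool.or_eq_true, beq_iff_eq]; exact Or.inr hI)
        | (have hbi : pvBI (tags.getD k "") = false := by
              simp only [pvBI, pvLab_eq, Bool.or_eq_false_iff, beq_eq_false_iff_ne]
              exact ⟨hB, hI⟩))
      all_goals (
        first
        | (have hob : pvOB (tags.getD k "") = true := by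
              simp only [pvOB, pvLab_eq, Bool.or_eq_true, beq_iff_eq]; exact Or.inr hB)
        | skip)
      all_goals
        by_cases hO : ((PySem.Str.pyGet? (tags.getD (k+1) "") 0).getD ' ' = 'O' ∨
                       (PySem.Str.pyGet? (tags.getD (k+1) "") 0).getD ' ' = 'B')
      all_goals (
        first
        | (have hob' : pvOB (tags.getD (k+1) "") = true := by
              simp only [pvOB, pvLab_eq, Bool.or_eq_true, beq_iff_eq]; exact hO)
        | (have hob' : pvOB (tags.getD (k+1) "") = false := by
              simp only [pvOB, pvLab_eq, Bool.or_eq_false_iff, beq_eq_false_iff_ne]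
              push_neg at hO; exact hO))
      all_goals rw [hCA, hOW] at *
      all_goals split_ifs <;>
        simp_all [List.countP_append, List.append_eq_nil_iff, String.toList_eq_nil_iff,
          List.countP_cons, decide_eq_true_eq, hB, hI] <;>
        (first | rfl | tauto | omega)

-- loop invariant of B's for loop after the steps idx = 1 .. m-1
set_option maxHeartbeats 1000000 in
theorem pvBinv (words tags : List String) (tt : String) :
    ∀ m : Nat, 1 ≤ m →
    (((PySem.List.pyRange 1 (m : Int) 1).foldl (pvAltStep tags tt) (0, false)).2
        = (!pvOB (tags.getD (m - 1) "") && pvOpenT tags (m - 1)) ∧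
     ((PySem.List.pyRange 1 (m : Int) 1).foldl (pvAltStep tags tt) (0, false)).1
        = (pvCntB tags tt m : Int)) := by
  intro m hm
  induction m, hm using Nat.le_induction with
  | base =>
      simp [PySem.List.pyRange_one_eq_nil (by omega : (1:Int) ≤ 1), pvOpenT, pvCntB]
  | succ n hn ih =>
      obtain ⟨k, rfl⟩ : ∃ k, n = k + 1 := ⟨n - 1, by omega⟩
      rw [show ((k + 1 + 1 : Nat) : Int) = ((k + 1 : Nat) : Int) + 1 by push_cast; ring,
        PySem.List.pyRange_one_succ_right (by exact_mod_cast hn), List.foldl_append]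
      obtain ⟨h1, h2⟩ := ih
      generalize hsb : (PySem.List.pyRange 1 ((k + 1 : Nat) : Int) 1).foldl
        (pvAltStep tags tt) (0, false) = sb at h1 h2 ⊢
      clear hsb
      obtain ⟨num, inside⟩ := sb
      simp only [Nat.add_sub_cancel] at h1 h2 ⊢
      subst h1 h2
      have hOT : pvOpenT tags (k + 1) =
          (pvBI (tags.getD k "") || (!pvOB (tags.getD k "") && pvOpenT tags k)) := rfl
      have hCB : pvCntB tags tt (k + 1 + 1) = pvCntB tags tt (k + 1) +
          (if pvOB (tags.getD (k + 1) "") = true ∧ pvOpenT tags (k + 1) = true ∧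
              PySem.Str.slice (tags.getD (k + 1 - 1) "") (some 2) none = tt then 1 else 0) := rfl
      simp only [List.foldl_cons, List.foldl_nil, pvAltStep,
        show ((k + 1 : Nat) : Int) - 1 = ((k : Nat) : Int) by push_cast; ring,
        PySem.List.pyGetD_natCast, Nat.add_sub_cancel] at hCB ⊢
      by_cases hB : (PySem.Str.pyGet? (tags.getD k "") 0).getD ' ' = 'B' <;>
        by_cases hI : (PySem.Str.pyGet? (tags.getD k "") 0).getD ' ' = 'I'
      · exact absurd (hB ▸ hI) (by decide)
      all_goals (
        first
        | (have hbi : pvBI (tags.getD k "") = true := by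
              simp only [pvBI, pvLab_eq, Bool.or_eq_true, beq_iff_eq]; exact Or.inl hB)
        | (have hbi : pvBI (tags.getD k "") = true := by
              simp only [pvBI, pvLab_eq, Bool.or_eq_true, beq_iff_eq]; exact Or.inr hI)
        | (have hbi : pvBI (tags.getD k "") = false := by
              simp only [pvBI, pvLab_eq, Bool.or_eq_false_iff, beq_eq_false_iff_ne]
              exact ⟨hB, hI⟩))
      all_goals
        by_cases hO : ((PySem.Str.pyGet? (tags.getD (k+1) "") 0).getD ' ' = 'O' ∨
                       (PySem.Str.pyGet? (tags.getD (k+1) "") 0).getD ' ' = 'B')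
      all_goals (
        first
        | (have hob' : pvOB (tags.getD (k+1) "") = true := by
              simp only [pvOB, pvLab_eq, Bool.or_eq_true, beq_iff_eq]; exact hO)
        | (have hob' : pvOB (tags.getD (k+1) "") = false := by
              simp only [pvOB, pvLab_eq, Bool.or_eq_false_iff, beq_eq_false_iff_ne]
              push_neg at hO; exact hO))
      all_goals rw [hCB, hOT] at *
      all_goals split_ifs <;>
        simp_all [decide_eq_true_eq, hB, hI] <;>
        (first | rfl | tauto | omega | (push_cast; omega))

-- A's entity-counting loop is a countP
theorem pv_count_foldl (tt : String) (es : List (List Char × String × Option Int × Option Int)) (c : Int) :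
    es.foldl (fun acc e => if e.2.1 = tt then acc + 1 else acc) c
      = c + (es.countP (fun e => decide (e.2.1 = tt)) : Int) := by
  induction es generalizing c with
  | nil => simp
  | cons e es ih =>
    simp only [List.foldl_cons, List.countP_cons]
    rw [ih]
    split_ifs <;> simp_all <;> push_cast <;> ring

-- A's B-tag loop is the same countP B uses
theorem pv_gt_foldl (tt : String) (tags : List String) (c : Int) :
    tags.foldl
      (fun acc tag =>
        if PySem.Str.startswith tag "B" then
          (if PySem.Str.slice tag (some 2) none = tt then acc + 1 else acc)
        else acc) c
      = c + (tags.countP (fun tag => PySem.Str.startswith tag "B" && decide (PySem.Str.slice tag (some 2) none = tt)) : Int) := by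
  induction tags generalizing c with
  | nil => simp
  | cons t ts ih =>
    simp only [List.foldl_cons, List.countP_cons]
    rw [ih]
    split_ifs <;> simp_all <;> push_cast <;> ring

-- a word-backed open entity is in particular tag-open
theorem pvOpenW_le_T (words tags : List String) :
    ∀ j : Nat, pvOpenW words tags j = true → pvOpenT tags j = true := by
  intro j
  induction j with
  | zero => simp [pvOpenW, pvOpenT]
  | succ k ih =>
      simp only [pvOpenW, pvOpenT, Bool.or_eq_true, Bool.and_eq_true] at *
      tauto

-- outside D_, the two counters agree step by step
theorem pvCnt_agree (words tags : List String) (tt : String)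
    (hlen : words.length = tags.length)
    (hnD : ¬ D_get_sent_num_tags words tags tt) :
    ∀ m : Nat, m ≤ words.length → pvCntA words tags tt m = pvCntB tags tt m := by
  intro m
  induction m with
  | zero => intro _; rfl
  | succ k ih =>
      intro hk
      have hk' : k ≤ words.length := by omega
      simp only [pvCntA, pvCntB, ih hk']
      congr 1
      by_cases hcB : (pvOB (tags.getD k "") = true ∧ pvOpenT tags k = true ∧
          PySem.Str.slice (tags.getD (k - 1) "") (some 2) none = tt)
      · -- B commits at step k; show A does too, else D_ holds with i = k-1
        obtain ⟨hob, hot, hsl⟩ := hcB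
        obtain ⟨j, rfl⟩ : ∃ j, k = j + 1 := by
          cases k with
          | zero => simp [pvOpenT] at hot
          | succ j => exact ⟨j, rfl⟩
        by_cases how : pvOpenW words tags (j + 1) = true
        · simp [hot, how]
        · exfalso
          have how' : pvOpenW words tags (j + 1) = false := by simpa using how
          obtain ⟨k, hkj, hrun⟩ := (pvD_glue words tags j).1.mpr hot
          exact hnD ⟨j, by omega, pvSliceDrop _ _ |>.mpr (by simpa using hsl), k, hkj, hrun,
            (pvRun_succ tags k j hkj hrun).mpr hob, (pvD_glue words tags j).2.mpr how'⟩
      · -- B does not commit; A cannot either (pvOpenW → pvOpenT)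
        rw [if_neg hcB, if_neg]
        intro ⟨hob, how, hsl⟩
        exact hcB ⟨hob, pvOpenW_le_T words tags k how, hsl⟩

-- the A-counter never exceeds the B-counter
theorem pvCnt_le (words tags : List String) (tt : String) :
    ∀ m : Nat, pvCntA words tags tt m ≤ pvCntB tags tt m := by
  intro m
  induction m with
  | zero => exact le_refl _
  | succ k ih =>
      simp only [pvCntA, pvCntB]
      have : (if pvOB (tags.getD k "") = true ∧ pvOpenW words tags k = true ∧
          PySem.Str.slice (tags.getD (k - 1) "") (some 2) none = tt then 1 else 0)
          ≤ (if pvOB (tags.getD k "") = true ∧ pvOpenT tags k = true ∧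
          PySem.Str.slice (tags.getD (k - 1) "") (some 2) none = tt then 1 else 0) := by
        split_ifs with h1 h2
        · exact le_refl _
        · exact absurd ⟨h1.1, pvOpenW_le_T words tags k h1.2.1, h1.2.2⟩ h2
        · omega
        · exact le_refl _
      omega

-- inside D_, the B-counter is strictly ahead from the witness position on
theorem pvCnt_lt (words tags : List String) (tt : String)
    (i : Nat) (hob : pvOB (tags.getD (i + 1) "") = true)
    (hsl : PySem.Str.slice (tags.getD i "") (some 2) none = tt)
    (hot : pvOpenT tags (i + 1) = true) (how : pvOpenW words tags (i + 1) = false) :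
    ∀ m : Nat, i + 2 ≤ m → pvCntA words tags tt m < pvCntB tags tt m := by
  intro m
  induction m with
  | zero => omega
  | succ k ih =>
      intro hk
      by_cases hki : i + 2 ≤ k
      · have := ih hki
        simp only [pvCntA, pvCntB]
        have h2 := pvCnt_le words tags tt k
        split_ifs with h1 h3 <;> try omega
        · exact absurd ⟨h1.1, pvOpenW_le_T words tags k h1.2.1, h1.2.2⟩ h3
      · have hk2 : k = i + 1 := by omega
        subst hk2
        have hA : pvCntA words tags tt (i + 1 + 1) = pvCntA words tags tt (i + 1) +
            (if pvOB (tags.getD (i + 1) "") = true ∧ pvOpenW words tags (i + 1) = true ∧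
                PySem.Str.slice (tags.getD (i + 1 - 1) "") (some 2) none = tt then 1 else 0) := rfl
        have hB : pvCntB tags tt (i + 1 + 1) = pvCntB tags tt (i + 1) +
            (if pvOB (tags.getD (i + 1) "") = true ∧ pvOpenT tags (i + 1) = true ∧
                PySem.Str.slice (tags.getD (i + 1 - 1) "") (some 2) none = tt then 1 else 0) := rfl
        rw [hA, hB, Nat.add_sub_cancel, if_neg (by rw [how]; simp), if_pos ⟨hob, hot, hsl⟩]
        have := pvCnt_le words tags tt (i + 1)
        omega

-- the second components of the two results, as the counters at m = len(words)
theorem pvA_snd (words tags : List String) (tt : String) (h : 1 ≤ words.length) :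
    (get_sent_num_tags words tags tt).2 = (pvCntA words tags tt words.length : Int) := by
  have h4 := (pvAinv words tags tt words.length h).2.2.2
  simp only [get_sent_num_tags, bio_decode]
  rw [pv_count_foldl, h4]
  simp

theorem pvB_snd (words tags : List String) (tt : String) (h : 1 ≤ words.length) :
    (get_sent_num_tags_alt words tags tt).2 = (pvCntB tags tt words.length : Int) := by
  have h2 := (pvBinv words tags tt words.length h).2
  simp only [get_sent_num_tags_alt]
  exact h2

theorem pv_fst (words tags : List String) (tt : String) :
    (get_sent_num_tags words tags tt).1 = (get_sent_num_tags_alt words tags tt).1 := by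
  simp only [get_sent_num_tags, get_sent_num_tags_alt]
  rw [pv_gt_foldl]
  simp

-- ===== VERDICT (by name: the statement is the Claim_ definition above) =====
theorem get_sent_num_tags_spec : Claim_unchanged_get_sent_num_tags := by
  intro words tags tag_type _ hpre
  intro hnD
  obtain ⟨h2, hlen, -⟩ := hpre
  have h1 : 1 ≤ words.length := by omega
  apply Prod.ext
  · exact pv_fst words tags tag_type
  · rw [pvA_snd words tags tag_type h1, pvB_snd words tags tag_type h1,
      pvCnt_agree words tags tag_type hlen hnD words.length (le_refl _)]
theorem get_sent_num_tags_changed : Claim_changed_get_sent_num_tags := by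
  unfold Claim_changed_get_sent_num_tags; decide
theorem get_sent_num_tags_tight : Claim_exact_get_sent_num_tags := by
  intro words tags tag_type _ hpre hD heq
  obtain ⟨h2, hlen, -⟩ := hpre
  obtain ⟨i, hi, hdrop, k, hk, hrun, hnr, hall⟩ := hD
  have hob := (pvRun_succ tags k i hk hrun).mp hnr
  have hsl := (pvSliceDrop _ _).mp hdrop
  have hot := (pvD_glue words tags i).1.mp ⟨k, hk, hrun⟩
  have how := (pvD_glue words tags i).2.mp hall
  have h1 : 1 ≤ words.length := by omega
  have hlt := pvCnt_lt words tags tag_type i hob hsl hot how words.length (by omega)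
  have hA := pvA_snd words tags tag_type h1
  have hB := pvB_snd words tags tag_type h1
  rw [heq, hB] at hA
  have : pvCntB tags tag_type words.length = pvCntA words tags tag_type words.length := by
    exact_mod_cast hA
  omega
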